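-- pv_equiv track=rewrite | github.com/mathiassandnes/CrackTheClue | find_anagrams_v2.py | is_anagram
-- ===== SOURCE A (Python) =====
-- def is_anagram(anagram, candidate):
--     if len(anagram) == 0 or len(anagram) < len(candidate):
--         return
--     remainder = anagram
--     for letter in candidate:
--         if letter in remainder:
--             remainder = remainder.replace(letter, '', 1)
--         else:
--             return False
--     return True
-- ===== SOURCE B (Python) =====
-- def is_anagram(anagram, candidate):
--     if len(anagram) == 0 or len(anagram) < len(candidate):
--         return
--     a = sorted(anagram)
--     c = sorted(candidate)
--     i = 0
--     for ch in c:
--         while i < len(a) and a[i] < ch: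
--             i += 1
--         if i == len(a) or a[i] != ch:
--             return False
--         i += 1
--     return True
-- ===== Notes on version B (the rewrite author's own statement) =====
-- stated objective: faster
-- what changed: Replaces the per-letter membership scan plus replace-one-occurrence rebuild of the remainder string with sorting both strings once and a single two-pointer merge over the sorted character lists.
import Mathlib
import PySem

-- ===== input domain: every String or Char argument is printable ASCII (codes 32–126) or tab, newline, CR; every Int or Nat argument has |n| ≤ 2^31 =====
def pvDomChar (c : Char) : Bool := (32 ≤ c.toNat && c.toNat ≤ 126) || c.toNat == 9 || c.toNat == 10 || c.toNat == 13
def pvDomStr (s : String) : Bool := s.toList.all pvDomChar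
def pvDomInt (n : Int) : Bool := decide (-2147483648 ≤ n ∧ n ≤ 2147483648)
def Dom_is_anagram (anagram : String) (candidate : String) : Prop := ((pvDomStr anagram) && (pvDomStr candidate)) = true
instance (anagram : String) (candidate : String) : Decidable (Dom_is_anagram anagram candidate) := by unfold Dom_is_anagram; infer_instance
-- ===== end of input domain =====

-- B replaces A's per-letter membership scan + replace-one-occurrence remainder rebuild
-- by sorting both strings once and a single two-pointer merge (objective: faster).

-- ===== PORT A =====
-- A's loop over candidate; 'letter in remainder' is single-char membership (= List.contains),
-- and remainder.replace(letter, '', 1) removes the first occurrence of that char (= List.erase, exact).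
def isAnagramLoopA : List Char → List Char → Bool
  | [], _ => true
  | l :: ls, rem => if rem.contains l then isAnagramLoopA ls (rem.erase l) else false

def is_anagram (anagram : String) (candidate : String) : Option Bool :=
  -- len(s) on the stated domain = s.toList.length
  if anagram.toList.length = 0 ∨ anagram.toList.length < candidate.toList.length then none
  else some (isAnagramLoopA candidate.toList anagram.toList)

-- ===== PORT B =====
-- B's for-loop over sorted(candidate) with the inner while advancing an index over sorted(anagram):
-- first arg = the unconsumed part of sorted(anagram), second arg = remaining chars of sorted(candidate).
def isAnagramMerge : List Char → List Char → Bool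
  | _, [] => true
  | [], _ :: _ => false
  | y :: ys, x :: xs =>
    if y < x then isAnagramMerge ys (x :: xs)         -- inner while: skip a[i] < ch
    else if y = x then isAnagramMerge ys xs           -- matched, consume both
    else false                                        -- a[i] > ch: ch cannot occur

def is_anagram_alt (anagram : String) (candidate : String) : Option Bool :=
  if anagram.toList.length = 0 ∨ anagram.toList.length < candidate.toList.length then none
  else some (isAnagramMerge (PySem.List.sorted anagram.toList (fun x => x) false)
                            (PySem.List.sorted candidate.toList (fun x => x) false))

-- ===== PRECONDITION & SPEC =====
def Spec_is_anagram (anagram : String) (candidate : String) (out : Option Bool) : Prop := out = is_anagram_alt anagram candidate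
instance (anagram : String) (candidate : String) (out : Option Bool) : Decidable (Spec_is_anagram anagram candidate out) := by unfold Spec_is_anagram; infer_instance

-- ===== CLAIM (what is proved, stated in full; the proofs are below) =====
def Claim_equal_is_anagram : Prop := ∀ (anagram : String) (candidate : String), Dom_is_anagram anagram candidate → Spec_is_anagram anagram candidate (is_anagram anagram candidate)

-- ===== LEMMAS AND PROOFS =====

-- A's loop succeeds iff candidate's letters form a sub-multiset of the remainder's letters.
theorem loopA_iff (c r : List Char) :
    isAnagramLoopA c r = true ↔ (↑c : Multiset Char) ≤ ↑r := by
  induction c generalizing r with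
  | nil => simp [isAnagramLoopA]
  | cons l ls ih =>
    simp only [isAnagramLoopA]
    by_cases h : l ∈ r
    · rw [if_pos (by simpa using h), ih]
      have hr : (↑r : Multiset Char) = l ::ₘ ↑(r.erase l) := by
        rw [← Multiset.coe_erase]
        exact (Multiset.cons_erase (by simpa using h)).symm
      constructor
      · intro hle
        rw [hr, Multiset.cons_coe]
        exact Multiset.cons_le_cons l hle
      · intro hle
        rw [hr, Multiset.cons_coe] at hle
        exact (Multiset.cons_le_cons_iff l).mp hle
    · rw [if_neg (by simpa using h)]
      constructor
      · intro hfalse; exact absurd hfalse (by simp)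
      · intro hle
        exact absurd (by simpa using Multiset.mem_of_le hle (show l ∈ (↑(l :: ls) : Multiset Char) by simp)) h

theorem notMem_le_cons {y : Char} {s t : Multiset Char} (h : y ∉ s) :
    s ≤ y ::ₘ t ↔ s ≤ t := by
  constructor
  · intro hle
    rw [Multiset.le_iff_count] at hle ⊢
    intro b
    have := hle b
    rw [Multiset.count_cons] at this
    by_cases hb : b = y
    · subst hb; simp [Multiset.count_eq_zero_of_notMem h]
    · simpa [hb] using this
  · intro hle
    exact hle.trans (Multiset.le_cons_self t y)

-- The two-pointer merge on sorted lists decides the same sub-multiset relation.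
theorem merge_iff (a c : List Char) (ha : a.Pairwise (· ≤ ·)) (hc : c.Pairwise (· ≤ ·)) :
    isAnagramMerge a c = true ↔ (↑c : Multiset Char) ≤ ↑a := by
  induction a generalizing c with
  | nil =>
    cases c with
    | nil => simp [isAnagramMerge]
    | cons x xs => simp [isAnagramMerge]
  | cons y ys ih =>
    cases c with
    | nil => simp [isAnagramMerge]
    | cons x xs =>
      simp only [isAnagramMerge]
      rcases lt_trichotomy y x with hyx | hyx | hyx
      · rw [if_pos hyx, ih (x :: xs) (List.Pairwise.of_cons ha) hc]
        have hnm : y ∉ (↑(x :: xs) : Multiset Char) := by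
          simp only [Multiset.mem_coe, List.mem_cons]
          rintro (rfl | hm)
          · exact absurd hyx (lt_irrefl y)
          · exact absurd (lt_of_lt_of_le hyx ((List.pairwise_cons.mp hc).1 y hm)) (lt_irrefl y)
        rw [show ((↑(y :: ys) : Multiset Char)) = y ::ₘ ↑ys from by simp,
            notMem_le_cons hnm]
      · subst hyx
        rw [if_neg (lt_irrefl y), if_pos rfl,
            ih xs (List.Pairwise.of_cons ha) (List.Pairwise.of_cons hc)]
        rw [show ((↑(y :: ys) : Multiset Char)) = y ::ₘ ↑ys from by simp,
            show ((↑(y :: xs) : Multiset Char)) = y ::ₘ ↑xs from by simp]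
        exact (Multiset.cons_le_cons_iff y).symm
      · rw [if_neg (not_lt.mpr (le_of_lt hyx)), if_neg (ne_of_gt hyx)]
        constructor
        · intro hfalse; exact absurd hfalse (by simp)
        · intro hle
          exfalso
          have hx : x ∈ (↑(y :: ys) : Multiset Char) :=
            Multiset.mem_of_le hle (by simp)
          simp only [Multiset.mem_coe, List.mem_cons] at hx
          rcases hx with rfl | hx
          · exact absurd hyx (lt_irrefl x)
          · have : y ≤ x := (List.pairwise_cons.mp ha).1 x hx
            exact absurd hyx (not_lt.mpr this)

-- ===== VERDICT (by name: the statement is the Claim_ definition above) =====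
theorem is_anagram_spec : Claim_equal_is_anagram := by
  intro anagram candidate _
  unfold Spec_is_anagram is_anagram is_anagram_alt
  by_cases hg : anagram.toList.length = 0 ∨ anagram.toList.length < candidate.toList.length
  · rw [if_pos hg, if_pos hg]
  · rw [if_neg hg, if_neg hg]
    congr 1
    rw [Bool.eq_iff_iff, loopA_iff,
        merge_iff _ _
          (by simpa using PySem.List.sorted_pairwise anagram.toList (fun x => x) )
          (by simpa using PySem.List.sorted_pairwise candidate.toList (fun x => x)),
        Multiset.coe_eq_coe.mpr (PySem.List.sorted_perm anagram.toList (fun x => x) false),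
        Multiset.coe_eq_coe.mpr (PySem.List.sorted_perm candidate.toList (fun x => x) false)]
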